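-- pv_equiv track=rewrite | github.com/Bruhris/HIP-Project | textNormalizer/normalizer_sentence_only.py | validateTextOrArgument
-- ===== SOURCE A (Python) =====
-- def validateTextOrArgument(text, funcType):
--       #this checks if a text looks like an argument for function call, for loop / if statement etc.
--       text = text.strip()
--       if funcType in "elif while for switch": #(else) if or elif, just in case
--             return False
--       else:
--             if text.count(",") == 0:
--                   if text.count("(") > 0:
--                         return False # we do not see bracket embedded in other brackets in a normal text!
--                   elif text.count(" ") <= 2:
--                         #String blah_blah    const string &str
--                         return False
--             else:
--                   # more than 1 argument: recurssive call to this function to check each argument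
--                   for arg in text.split(","):
--                         if validateTextOrArgument(arg, funcType) == True:
--                               return True
--                   return False
--       return True
-- ===== SOURCE B (Python) =====
-- def _plausible_arg(s):
--     # one argument candidate: no '(' and more than 2 spaces after stripping
--     s = s.strip()
--     return s.count("(") == 0 and s.count(" ") > 2
--
--
-- def validateTextOrArgument(text, funcType):
--     if funcType in "elif while for switch":
--         return False
--     args = text.strip().split(",")
--     if len(args) == 1:
--         return _plausible_arg(args[0])
--     return any(_plausible_arg(a) for a in args)
-- ===== Notes on version B (the rewrite author's own statement) =====
-- stated objective: simpler
-- what changed: Replaces A's one-level recursion (the function re-entering itself on each comma-split piece, re-checking funcType and the comma count every time) by a flat non-recursive decomposition: a single-argument validator applied to the one stripped argument or mapped over the split pieces with any().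
import Mathlib
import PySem

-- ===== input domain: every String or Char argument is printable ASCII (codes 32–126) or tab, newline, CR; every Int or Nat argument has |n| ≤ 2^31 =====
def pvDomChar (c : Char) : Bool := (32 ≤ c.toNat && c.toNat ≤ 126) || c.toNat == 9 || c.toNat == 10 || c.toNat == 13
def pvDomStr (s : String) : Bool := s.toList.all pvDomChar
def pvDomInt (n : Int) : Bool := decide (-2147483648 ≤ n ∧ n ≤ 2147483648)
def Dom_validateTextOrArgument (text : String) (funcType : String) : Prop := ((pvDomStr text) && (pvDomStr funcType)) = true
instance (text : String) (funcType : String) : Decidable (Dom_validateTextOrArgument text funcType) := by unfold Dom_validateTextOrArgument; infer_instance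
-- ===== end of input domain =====

-- B replaces A's one-level recursion over the split arguments by a flat single-argument
-- validator applied with `any` (objective: simpler; same cost).

-- ===== PORT A =====
-- exact port of s.split(","): PySem.Chars.splitOn is Python str.split for a nonempty separator
def pvSplitComma (s : String) : List String :=
  (PySem.Chars.splitOn s.toList [',']).map String.ofList

-- termination lemmas for the recursive port of A (cited by decreasing_by)
theorem pvCountGo_singleton (c : Char) (fuel : Nat) :
    ∀ (l : List Char) (acc : Nat), l.length ≤ fuel →
    PySem.Chars.count.go [c] fuel l acc = acc + l.count c := by
  induction fuel with
  | zero =>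
    intro l acc hf
    have hl : l = [] := List.length_eq_zero_iff.mp (Nat.le_zero.mp hf)
    subst hl; simp [PySem.Chars.count.go]
  | succ f ih =>
    intro l acc hf
    cases l with
    | nil => simp [PySem.Chars.count.go]
    | cons a rest =>
      rw [PySem.Chars.count.go.eq_def]
      simp only [List.isPrefixOf, Bool.and_true]
      by_cases hc : (c == a) = true
      · rw [if_pos hc]
        have ha : c = a := by simpa using hc
        simp only [List.length_nil, List.length_cons, List.drop_zero,
          List.drop_succ_cons]
        rw [ih rest _ (by simp at hf; omega)]
        subst ha; simp; omega
      · rw [if_neg hc]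
        rw [ih rest acc (by simp at hf; omega)]
        have hac : ¬ (a == c) = true := by
          simp at hc ⊢; exact fun h => hc h.symm
        simp [List.count_cons, hac]

theorem pvCount_singleton (l : List Char) (c : Char) :
    PySem.Chars.count l [c] = l.count c := by
  rw [PySem.Chars.count]
  simp only [List.isEmpty_cons, if_false, Bool.false_eq_true]
  simpa using pvCountGo_singleton c l.length l 0 (le_refl _)

theorem pvLstrip_sublist (l : List Char) : (PySem.Chars.lstrip l).Sublist l := by
  rw [PySem.Chars.lstrip]; exact (List.dropWhile_suffix _).sublist

theorem pvRstrip_prefix (l : List Char) : (PySem.Chars.rstrip l).IsPrefix l := by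
  rw [PySem.Chars.rstrip]
  have h := (List.dropWhile_suffix (l := l.reverse) PySem.Chars.isspace)
  have := h.reverse
  simpa using this

theorem pvStrip_sublist (l : List Char) : (PySem.Chars.strip l).Sublist l := by
  rw [PySem.Chars.strip]
  exact ((pvRstrip_prefix _).sublist).trans (pvLstrip_sublist l)

theorem pvSplitGo_no_sep (c : Char) (fuel : Nat) :
    ∀ (l cur : List Char) (acc : List (List Char)),
    l.length ≤ fuel → c ∉ cur → (∀ p ∈ acc, c ∉ p) →
    ∀ p ∈ PySem.Chars.splitOn.go [c] fuel l cur acc, c ∉ p := by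
  induction fuel with
  | zero =>
    intro l cur acc hf hcur hacc p hp
    have hl : l = [] := List.length_eq_zero_iff.mp (Nat.le_zero.mp hf)
    subst hl
    rw [PySem.Chars.splitOn.go.eq_def] at hp
    simp at hp
    rcases hp with h | h
    · exact hacc _ h
    · subst h; simpa using hcur
  | succ f ih =>
    intro l cur acc hf hcur hacc p hp
    cases l with
    | nil =>
      rw [PySem.Chars.splitOn.go.eq_def] at hp
      simp at hp
      rcases hp with h | h
      · exact hacc _ h
      · subst h; simpa using hcur
    | cons a rest =>
      rw [PySem.Chars.splitOn.go.eq_def] at hp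
      simp only at hp
      by_cases hpre : [c].isPrefixOf (a :: rest) = true
      · rw [if_pos hpre] at hp
        refine ih _ _ _ (by simp at hf ⊢; omega) (by simp) ?_ p hp
        intro q hq
        rcases List.mem_cons.mp hq with hq | hq
        · subst hq; simpa using hcur
        · exact hacc _ hq
      · rw [if_neg hpre] at hp
        have hca : c ≠ a := by
          intro h; subst h
          simp [List.isPrefixOf] at hpre
        refine ih rest (a :: cur) acc (by simpa using Nat.le_of_succ_le_succ (by simpa using hf)) ?_ hacc p hp
        intro h
        rcases List.mem_cons.mp h with h | h
        · exact hca h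
        · exact hcur h

theorem pvSplit_no_comma (c : Char) (l : List Char) :
    ∀ p ∈ PySem.Chars.splitOn l [c], c ∉ p := by
  rw [PySem.Chars.splitOn]
  exact pvSplitGo_no_sep c (l.length + 1) l [] [] (by omega) (by simp) (by simp)

set_option maxHeartbeats 1000000 in
def validateTextOrArgument (text : String) (funcType : String) : Bool :=
  let t := PySem.Str.strip text
  if PySem.Str.isIn funcType "elif while for switch" then false
  else if h0 : PySem.Str.count t "," == 0 then
    if PySem.Str.count t "(" > 0 then false
    else if PySem.Str.count t " " ≤ 2 then false
    else true
  else
    (pvSplitComma t).attach.any (fun arg => validateTextOrArgument arg.1 funcType)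
termination_by PySem.Str.count text ","
decreasing_by
  obtain ⟨arg, hmem⟩ := arg
  obtain ⟨p, hpmem, rfl⟩ := List.mem_map.mp hmem
  have hcl : (",".toList) = [','] := rfl
  have h1 : PySem.Str.count (String.ofList p) "," = 0 := by
    rw [PySem.Str.count_eq]
    simp only [String.toList_ofList, hcl, pvCount_singleton]
    exact List.count_eq_zero.mpr (fun h => pvSplit_no_comma ',' _ p hpmem h)
  have h2 : PySem.Str.count (PySem.Str.strip text) "," ≤ PySem.Str.count text "," := by
    rw [PySem.Str.count_eq, PySem.Str.count_eq, PySem.Str.toList_strip, hcl,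
      pvCount_singleton, pvCount_singleton]
    exact (pvStrip_sublist _).count_le ','
  have h3 : PySem.Str.count (PySem.Str.strip text) "," ≠ 0 := by
    intro hh
    exact h0 (by rw [show t = PySem.Str.strip text from rfl, hh]; rfl)
  show PySem.Str.count (String.ofList p) "," < PySem.Str.count text ","
  omega

-- ===== PORT B =====
def pvPlausibleArg (s : String) : Bool :=
  let s := PySem.Str.strip s
  (PySem.Str.count s "(" == 0) && decide (PySem.Str.count s " " > 2)

def validateTextOrArgument_alt (text : String) (funcType : String) : Bool :=
  if PySem.Str.isIn funcType "elif while for switch" then false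
  else
    match pvSplitComma (PySem.Str.strip text) with
    | [a] => pvPlausibleArg a
    | args => args.any pvPlausibleArg

-- ===== PRECONDITION & SPEC =====
def Spec_validateTextOrArgument (text : String) (funcType : String) (out : Bool) : Prop := out = validateTextOrArgument_alt text funcType
instance (text : String) (funcType : String) (out : Bool) : Decidable (Spec_validateTextOrArgument text funcType out) := by unfold Spec_validateTextOrArgument; infer_instance

-- ===== CLAIM (what is proved, stated in full; the proofs are below) =====
def Claim_equal_validateTextOrArgument : Prop := ∀ (text : String) (funcType : String), Dom_validateTextOrArgument text funcType → Spec_validateTextOrArgument text funcType (validateTextOrArgument text funcType)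

-- ===== LEMMAS AND PROOFS =====

theorem pvDropWhile_idem (p : Char → Bool) (l : List Char) :
    List.dropWhile p (List.dropWhile p l) = List.dropWhile p l := by
  rw [List.dropWhile_eq_self_iff]
  intro hl
  have h := List.head?_dropWhile_not p l
  rw [List.head?_eq_getElem?, List.getElem?_eq_getElem hl] at h
  simpa using h

theorem pvPrefix_dropWhile_self (p : Char → Bool) {l m : List Char}
    (hpref : m <+: l) (hl : List.dropWhile p l = l) :
    List.dropWhile p m = m := by
  rw [List.dropWhile_eq_self_iff]
  intro hm
  have hll : 0 < l.length := lt_of_lt_of_le hm hpref.length_le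
  rw [hpref.getElem hm]
  exact (List.dropWhile_eq_self_iff.mp hl) hll

theorem pvStrip_idem (l : List Char) :
    PySem.Chars.strip (PySem.Chars.strip l) = PySem.Chars.strip l := by
  have ha : List.dropWhile PySem.Chars.isspace (PySem.Chars.lstrip l) = PySem.Chars.lstrip l :=
    pvDropWhile_idem _ _
  have hb : List.dropWhile PySem.Chars.isspace (PySem.Chars.strip l) = PySem.Chars.strip l := by
    rw [PySem.Chars.strip]
    exact pvPrefix_dropWhile_self _ (pvRstrip_prefix _) ha
  conv_lhs => rw [PySem.Chars.strip, PySem.Chars.lstrip, hb]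
  rw [PySem.Chars.strip, PySem.Chars.rstrip, PySem.Chars.rstrip, List.reverse_reverse,
    pvDropWhile_idem]

theorem pvStrStrip_idem (s : String) :
    PySem.Str.strip (PySem.Str.strip s) = PySem.Str.strip s := by
  rw [← String.toList_inj, PySem.Str.toList_strip, PySem.Str.toList_strip, pvStrip_idem]

theorem pvSplitGo_all (c : Char) (fuel : Nat) :
    ∀ (l cur : List Char) (acc : List (List Char)), l.length ≤ fuel → c ∉ l →
    PySem.Chars.splitOn.go [c] fuel l cur acc = ((cur.reverse ++ l) :: acc).reverse := by
  induction fuel with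
  | zero =>
    intro l cur acc hf _
    have hl : l = [] := List.length_eq_zero_iff.mp (Nat.le_zero.mp hf)
    subst hl
    rw [PySem.Chars.splitOn.go.eq_def]
  | succ f ih =>
    intro l cur acc hf hl
    cases l with
    | nil => rw [PySem.Chars.splitOn.go.eq_def]; simp
    | cons a rest =>
      rw [PySem.Chars.splitOn.go.eq_def]
      have hca : c ≠ a := fun h => hl (h ▸ List.mem_cons_self)
      have hpre : ([c].isPrefixOf (a :: rest)) = false := by
        simp [List.isPrefixOf]
        exact fun h => hca h
      simp only [hpre, Bool.false_eq_true, if_false]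
      rw [ih rest (a :: cur) acc (by simpa using Nat.le_of_succ_le_succ (by simpa using hf))
        (fun h => hl (List.mem_cons_of_mem _ h))]
      simp

theorem pvSplit_single (c : Char) (l : List Char) (h : c ∉ l) :
    PySem.Chars.splitOn l [c] = [l] := by
  rw [PySem.Chars.splitOn, pvSplitGo_all c (l.length + 1) l [] [] (by omega) h]
  simp

theorem pvSplitGo_ge (c : Char) (fuel : Nat) :
    ∀ (l cur : List Char) (acc : List (List Char)),
    acc.length + 1 ≤ (PySem.Chars.splitOn.go [c] fuel l cur acc).length := by
  induction fuel with
  | zero =>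
    intro l cur acc
    rw [PySem.Chars.splitOn.go.eq_def]
    cases l <;> simp
  | succ f ih =>
    intro l cur acc
    cases l with
    | nil => rw [PySem.Chars.splitOn.go.eq_def]; simp
    | cons a rest =>
      rw [PySem.Chars.splitOn.go.eq_def]
      simp only
      by_cases hpre : ([c].isPrefixOf (a :: rest)) = true
      · rw [if_pos hpre]
        have := ih (List.drop 1 (a :: rest)) [] (cur.reverse :: acc)
        simp at this ⊢
        omega
      · rw [if_neg hpre]
        exact ih rest (a :: cur) acc

theorem pvSplitGo_two (c : Char) (fuel : Nat) :
    ∀ (l cur : List Char) (acc : List (List Char)), l.length ≤ fuel → c ∈ l →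
    acc.length + 2 ≤ (PySem.Chars.splitOn.go [c] fuel l cur acc).length := by
  induction fuel with
  | zero =>
    intro l cur acc hf hc
    have hl : l = [] := List.length_eq_zero_iff.mp (Nat.le_zero.mp hf)
    subst hl; simp at hc
  | succ f ih =>
    intro l cur acc hf hc
    cases l with
    | nil => simp at hc
    | cons a rest =>
      rw [PySem.Chars.splitOn.go.eq_def]
      simp only
      by_cases hpre : ([c].isPrefixOf (a :: rest)) = true
      · rw [if_pos hpre]
        have := pvSplitGo_ge c f (List.drop 1 (a :: rest)) [] (cur.reverse :: acc)
        simp at this ⊢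
        omega
      · rw [if_neg hpre]
        have hca : c ≠ a := by
          intro h; subst h; simp [List.isPrefixOf] at hpre
        have hcr : c ∈ rest := by
          rcases List.mem_cons.mp hc with h | h
          · exact absurd h hca
          · exact h
        exact ih rest (a :: cur) acc (by simpa using Nat.le_of_succ_le_succ (by simpa using hf)) hcr

theorem pvSplit_two (c : Char) (l : List Char) (h : c ∈ l) :
    2 ≤ (PySem.Chars.splitOn l [c]).length := by
  rw [PySem.Chars.splitOn]
  simpa using pvSplitGo_two c (l.length + 1) l [] [] (by omega) h

theorem pvChain (a b : Nat) :
    (if a > 0 then false else if b ≤ 2 then false else true) =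
      ((a == 0) && decide (b > 2)) := by
  split_ifs <;> simp_all
  omega

theorem pvCountComma_eq_zero (s : String) (h : ',' ∉ s.toList) :
    (PySem.Str.count (PySem.Str.strip s) "," == 0) = true := by
  rw [PySem.Str.count_eq, PySem.Str.toList_strip, show (",".toList) = [','] from rfl,
    pvCount_singleton]
  simp only [beq_iff_eq]
  exact List.count_eq_zero.mpr (fun hm => h ((pvStrip_sublist _).subset hm))

theorem pvAnyCongrMem {α : Type} (l : List α) (f g : α → Bool)
    (h : ∀ x ∈ l, f x = g x) : l.any f = l.any g := by
  induction l with
  | nil => rfl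
  | cons a rest ih =>
    simp only [List.any_cons]
    rw [h a List.mem_cons_self, ih (fun x hx => h x (List.mem_cons_of_mem _ hx))]

theorem pvPieceA (f p : String)
    (hf : PySem.Str.isIn f "elif while for switch" = false)
    (hp : ',' ∉ p.toList) :
    validateTextOrArgument p f = pvPlausibleArg p := by
  rw [validateTextOrArgument]
  simp only [hf, Bool.false_eq_true, if_false, pvCountComma_eq_zero p hp, dif_pos]
  rw [pvPlausibleArg]
  simp only [gt_iff_lt]
  rw [← pvChain]

-- ===== VERDICT (by name: the statement is the Claim_ definition above) =====
theorem validateTextOrArgument_spec : Claim_equal_validateTextOrArgument := by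
  intro text f _
  unfold Spec_validateTextOrArgument
  by_cases hf : PySem.Str.isIn f "elif while for switch" = true
  · rw [validateTextOrArgument, validateTextOrArgument_alt, if_pos hf, if_pos hf]
  · have hf' : PySem.Str.isIn f "elif while for switch" = false := by simpa using hf
    by_cases hc : (PySem.Str.count (PySem.Str.strip text) "," == 0) = true
    · -- no comma: A takes the single-argument branch, B sees a one-element split
      have hnc : ',' ∉ (PySem.Str.strip text).toList := by
        rw [PySem.Str.count_eq, show (",".toList) = [','] from rfl, pvCount_singleton,
          beq_iff_eq] at hc
        exact List.count_eq_zero.mp hc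
      rw [validateTextOrArgument, validateTextOrArgument_alt]
      simp only [hf', Bool.false_eq_true, if_false, hc, dif_pos]
      rw [pvSplitComma, pvSplit_single ',' _ hnc]
      simp only [List.map_cons, List.map_nil, String.ofList_toList]
      rw [pvPlausibleArg]
      simp only [pvStrStrip_idem, gt_iff_lt]
      rw [← pvChain]
    · -- comma present: A recurses over the pieces, B maps the validator over them
      have hmc : ',' ∈ (PySem.Str.strip text).toList := by
        rw [PySem.Str.count_eq, show (",".toList) = [','] from rfl, pvCount_singleton,
          beq_iff_eq] at hc
        exact List.count_pos_iff.mp (Nat.pos_of_ne_zero hc)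
      rw [validateTextOrArgument, validateTextOrArgument_alt]
      simp only [hf', Bool.false_eq_true, if_false, hc, dif_neg, not_false_iff]
      have hlen : 2 ≤ (pvSplitComma (PySem.Str.strip text)).length := by
        rw [pvSplitComma]
        simpa using pvSplit_two ',' _ hmc
      have hpieces : ∀ x ∈ pvSplitComma (PySem.Str.strip text),
          validateTextOrArgument x f = pvPlausibleArg x := by
        intro x hx
        obtain ⟨p, hpmem, rfl⟩ := List.mem_map.mp hx
        exact pvPieceA f _ hf' (by simpa using pvSplit_no_comma ',' _ p hpmem)
      have hany : ((pvSplitComma (PySem.Str.strip text)).attach.any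
            (fun arg => validateTextOrArgument arg.1 f)) =
          (pvSplitComma (PySem.Str.strip text)).any pvPlausibleArg := by
        rw [show ((pvSplitComma (PySem.Str.strip text)).attach.any
              (fun arg => validateTextOrArgument arg.1 f)) =
            (pvSplitComma (PySem.Str.strip text)).any (fun x => validateTextOrArgument x f) from by
          simp only [List.any_subtype, List.unattach_attach]]
        exact pvAnyCongrMem _ _ _ hpieces
      rw [hany]
      cases hargs : pvSplitComma (PySem.Str.strip text) with
      | nil => simp [hargs] at hlen
      | cons a rest =>
        cases rest with
        | nil => rw [hargs] at hlen; simp at hlen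
        | cons b rest2 => simp [List.any_cons]
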